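-- pv_equiv track=rewrite | github.com/kuznetsovvj/education | algorithms/codeforces/1367b.py | check
-- ===== SOURCE A (Python) =====
-- def check(seq):
--     c, w = 0, 0
--     for idx, it in enumerate(seq):
--         if it % 2 == 1:
--             c += 1
--         if idx % 2 != it % 2:
--             w += 1
--     if len(seq) // 2 != c:
--         return -1
--     else:
--         return w // 2
-- ===== SOURCE B (Python) =====
-- def check(seq):
--     odds = sum(1 for x in seq if x % 2 == 1)
--     if len(seq) // 2 != odds:
--         return -1
--     return sum(1 for x in seq[::2] if x % 2 == 1)
-- ===== Notes on version B (the rewrite author's own statement) =====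
-- stated objective: simpler
-- what changed: Replaces A's single interleaved pass that counts every parity mismatch and halves it with a total-odds validity check plus one count of odd values on the even-index slice seq[::2], using the identity that in a valid arrangement the two mismatch kinds are equal.
import Mathlib
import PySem

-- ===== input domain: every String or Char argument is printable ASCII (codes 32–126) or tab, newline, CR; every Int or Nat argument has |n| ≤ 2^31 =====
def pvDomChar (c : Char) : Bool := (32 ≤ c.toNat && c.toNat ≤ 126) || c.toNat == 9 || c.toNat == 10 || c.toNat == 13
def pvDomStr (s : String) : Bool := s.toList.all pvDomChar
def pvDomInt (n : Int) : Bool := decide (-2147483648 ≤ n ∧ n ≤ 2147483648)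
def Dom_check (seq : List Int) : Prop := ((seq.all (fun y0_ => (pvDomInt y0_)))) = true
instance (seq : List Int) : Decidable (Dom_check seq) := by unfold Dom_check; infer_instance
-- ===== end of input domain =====

-- B replaces A's single interleaved mismatch-counting pass by a total-odds validity check
-- plus one count of odds on the even-index slice seq[::2] (objective: simpler decomposition).

-- ===== PORT A =====
-- one pass over enumerate(seq) maintaining (c, w)
def check (seq : List Int) : Int :=
  let cw := (PySem.List.enumerate seq).foldl
    (fun (st : Int × Int) p =>
      let c := if PySem.Int.mod p.2 2 = 1 then st.1 + 1 else st.1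
      let w := if PySem.Int.mod p.1 2 ≠ PySem.Int.mod p.2 2 then st.2 + 1 else st.2
      (c, w)) (0, 0)
  if PySem.Int.floordiv (seq.length : Int) 2 ≠ cw.1 then -1
  else PySem.Int.floordiv cw.2 2

-- ===== PORT B =====
-- sum(1 for x in xs if x % 2 == 1)
def oddSum (xs : List Int) : Int :=
  ((xs.filter (fun x => PySem.Int.mod x 2 == 1)).map (fun _ => (1 : Int))).sum

def check_alt (seq : List Int) : Int :=
  let odds := oddSum seq
  if PySem.Int.floordiv (seq.length : Int) 2 ≠ odds then -1
  else oddSum ((PySem.List.slice? seq none none 2).getD [])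

-- ===== PRECONDITION & SPEC =====
def Spec_check (seq : List Int) (out : Int) : Prop := out = check_alt seq
instance (seq : List Int) (out : Int) : Decidable (Spec_check seq out) := by unfold Spec_check; infer_instance

-- ===== CLAIM (what is proved, stated in full; the proofs are below) =====
def Claim_equal_check : Prop := ∀ (seq : List Int), Dom_check seq → Spec_check seq (check seq)

-- ===== LEMMAS AND PROOFS =====

-- elements at even positions (xs[::2])
def everyOther : List Int → List Int
  | [] => []
  | [x] => [x]
  | x :: _ :: r => x :: everyOther r

-- number of odd positions = len // 2
def oddSlots : List Int → Int
  | [] => 0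
  | [_] => 0
  | _ :: _ :: r => 1 + oddSlots r

-- A's mismatch count starting at index s
def mism (s : Int) : List Int → Int
  | [] => 0
  | x :: xs => (if PySem.Int.mod s 2 ≠ PySem.Int.mod x 2 then 1 else 0) + mism (s + 1) xs

-- A's odd count
def cnt : List Int → Int
  | [] => 0
  | x :: xs => (if PySem.Int.mod x 2 = 1 then 1 else 0) + cnt xs

theorem mod_two_cases (x : Int) : PySem.Int.mod x 2 = 0 ∨ PySem.Int.mod x 2 = 1 := by
  have h1 := PySem.Int.mod_nonneg x (b := 2) (by omega)
  have h2 := PySem.Int.mod_lt x (b := 2) (by omega)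
  omega

theorem check_fold (seq : List Int) (s c w : Int) :
    (PySem.List.enumerate seq s).foldl
      (fun (st : Int × Int) p =>
        let c := if PySem.Int.mod p.2 2 = 1 then st.1 + 1 else st.1
        let w := if PySem.Int.mod p.1 2 ≠ PySem.Int.mod p.2 2 then st.2 + 1 else st.2
        (c, w)) (c, w) = (c + cnt seq, w + mism s seq) := by
  induction seq generalizing s c w with
  | nil => simp [PySem.List.enumerate_nil, cnt, mism]
  | cons x xs ih =>
      rw [PySem.List.enumerate_cons]
      simp only [List.foldl_cons, cnt, mism]
      rw [ih]
      split_ifs <;> simp only [Prod.mk.injEq] <;> constructor <;> ring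

theorem mism_parity (seq : List Int) (s t : Int)
    (h : PySem.Int.mod s 2 = PySem.Int.mod t 2) : mism s seq = mism t seq := by
  induction seq generalizing s t with
  | nil => rfl
  | cons x xs ih =>
      simp only [mism, h]
      congr 1
      apply ih
      have hs := PySem.Int.floordiv_mul_add_mod s 2
      have ht := PySem.Int.floordiv_mul_add_mod t 2
      have hb1 := PySem.Int.mod_nonneg s (b := 2) (by omega)
      have hb2 := PySem.Int.mod_lt s (b := 2) (by omega)
      have hb3 := PySem.Int.mod_nonneg t (b := 2) (by omega)
      have hb4 := PySem.Int.mod_lt t (b := 2) (by omega)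
      have h1 := PySem.Int.mod_nonneg (s+1) (b := 2) (by omega)
      have h2 := PySem.Int.mod_lt (s+1) (b := 2) (by omega)
      have h3 := PySem.Int.mod_nonneg (t+1) (b := 2) (by omega)
      have h4 := PySem.Int.mod_lt (t+1) (b := 2) (by omega)
      have hs1 := PySem.Int.floordiv_mul_add_mod (s+1) 2
      have ht1 := PySem.Int.floordiv_mul_add_mod (t+1) 2
      omega

theorem everyOther_cons (y : Int) (r : List Int) :
    everyOther (y :: r) = y :: everyOther r.tail := by
  cases r <;> simp [everyOther]

-- the key count identity: mism 0 seq + cnt (everyOther seq.tail) = cnt (everyOther seq) + oddSlots seq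
theorem key : ∀ seq : List Int,
    mism 0 seq + cnt (everyOther seq.tail) = cnt (everyOther seq) + oddSlots seq
  | [] => by simp [mism, cnt, everyOther, oddSlots]
  | [x] => by
      have h0 : PySem.Int.mod (0 : Int) 2 = 0 := by decide
      simp only [List.tail_cons, everyOther, oddSlots, mism, cnt, h0]
      rcases mod_two_cases x with h | h <;> rw [h] <;> norm_num
  | x :: y :: r => by
      have ih := key r
      have hp : mism (0 + 1 + 1 : Int) r = mism 0 r := mism_parity r _ _ (by decide)
      have hm0 : PySem.Int.mod (0 : Int) 2 = 0 := by decide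
      have hm1 : PySem.Int.mod ((0 : Int) + 1) 2 = 1 := by decide
      simp only [List.tail_cons, everyOther_cons, oddSlots, mism, cnt, hp, hm0, hm1]
      rcases mod_two_cases x with hx | hx <;> rcases mod_two_cases y with hy | hy <;>
        rw [hx, hy] <;> norm_num <;> omega

theorem cnt_split : ∀ seq : List Int,
    cnt seq = cnt (everyOther seq) + cnt (everyOther seq.tail)
  | [] => by simp [cnt, everyOther]
  | [x] => by simp [cnt, everyOther]
  | x :: y :: r => by
      have ih := cnt_split r
      simp only [cnt, everyOther_cons, List.tail_cons] at *
      omega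

theorem oddSlots_eq : ∀ seq : List Int,
    oddSlots seq = PySem.Int.floordiv (seq.length : Int) 2
  | [] => by decide
  | [x] => by simp [oddSlots]
  | x :: y :: r => by
      have ih := oddSlots_eq r
      simp only [oddSlots, List.length_cons] at *
      rw [PySem.Int.floordiv_eq_ediv_of_pos (by omega)] at ih ⊢
      push_cast
      omega

theorem oddSum_eq_cnt (xs : List Int) : oddSum xs = cnt xs := by
  induction xs with
  | nil => rfl
  | cons x r ih =>
      simp only [oddSum, cnt, List.filter_cons, beq_iff_eq] at *
      split_ifs with h
      · simp only [List.map_cons, List.sum_cons, ih]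
      · simpa using ih

-- seq[::2] is everyOther
theorem slice2_aux : ∀ (xs : List Int) (n : Nat), n = (xs.length + 1) / 2 →
    (List.range n).filterMap (fun (k : Nat) => xs[(2 * (k : Int)).toNat]?) = everyOther xs
  | [], n, hn => by
      simp at hn
      subst hn
      simp [everyOther]
  | [x], n, hn => by
      simp at hn
      subst hn
      simp [List.range_succ, everyOther]
  | x :: y :: r, n, hn => by
      have hn' : n = (r.length + 1) / 2 + 1 := by simp at hn; omega
      subst hn'
      have hrec := slice2_aux r ((r.length + 1) / 2) rfl
      have harg : ∀ k : Nat,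
          (x :: y :: r)[(2 * ((k.succ : Nat) : Int)).toNat]? = r[(2 * ((k : Nat) : Int)).toNat]? := by
        intro k
        have h1 : (2 * ((k.succ : Nat) : Int)).toNat = 2 * k + 2 := by omega
        have h2 : (2 * ((k : Nat) : Int)).toNat = 2 * k := by omega
        rw [h1, h2]
        simp
      rw [List.range_succ_eq_map, List.filterMap_cons, List.filterMap_map]
      simp only [Function.comp_def, harg, hrec, everyOther]
      norm_num

theorem slice2 (xs : List Int) :
    (PySem.List.slice? xs none none 2).getD [] = everyOther xs := by
  rcases xs with _ | ⟨a, t⟩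
  · simp [PySem.List.slice?, PySem.List.sliceIndices, everyOther]
  · have hcount : (((t.length : Int) + 1 + 2 - 1) / 2).toNat = ((a :: t).length + 1) / 2 := by
      simp only [List.length_cons]
      omega
    simp only [PySem.List.slice?, PySem.List.sliceIndices]
    norm_num
    rw [hcount]
    exact slice2_aux (a :: t) _ rfl

-- ===== VERDICT (by name: the statement is the Claim_ definition above) =====
theorem check_spec : Claim_equal_check := by
  intro seq _
  unfold Spec_check check check_alt
  rw [check_fold seq 0 0 0]
  simp only [zero_add, oddSum_eq_cnt, slice2,
    PySem.Int.floordiv_eq_ediv_of_pos (show (0:Int) < 2 by omega)]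
  by_cases h : ((seq.length : Int)) / 2 = cnt seq
  · rw [if_neg (by omega), if_neg (by omega)]
    have hk := key seq
    have hs := cnt_split seq
    have ho := oddSlots_eq seq
    rw [PySem.Int.floordiv_eq_ediv_of_pos (show (0:Int) < 2 by omega)] at ho
    have h2 : mism 0 seq = 2 * cnt (everyOther seq) := by omega
    rw [h2]
    omega
  · rw [if_pos h, if_pos h]
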